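-- pv_equiv track=rewrite | github.com/elvisstaric/Diplomski_rad | Backend/services/test-coordinator/modules/llm_service.py | extract_variations_from_text
-- ===== SOURCE A (Python) =====
-- from typing import Dict, Any, Optional, List
--
-- def extract_variations_from_text(text: str) -> List[Dict[str, Any]]:
--     """Extract variations from LLM text response when JSON parsing fails"""
--     variations = []
--     lines = text.split('\n')
--
--     current_variation = {}
--     current_dsl = []
--     in_dsl_block = False
--
--     for line in lines:
--         line = line.strip()
--
--         if line.startswith('"variation_name"'):
--             if current_variation:
--                 current_variation['dsl_script'] = '\n'.join(current_dsl)
--                 variations.append(current_variation)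
--             current_variation = {}
--             current_dsl = []
--             in_dsl_block = False
--
--             name = line.split(':', 1)[1].strip().strip('"')
--             current_variation['variation_name'] = name
--
--         elif line.startswith('"description"'):
--             desc = line.split(':', 1)[1].strip().strip('"')
--             current_variation['description'] = desc
--
--         elif line.startswith('"dsl_script"'):
--             in_dsl_block = True
--
--         elif in_dsl_block and line and not line.startswith('"'):
--             current_dsl.append(line)
--
--
--     if current_variation:
--         current_variation['dsl_script'] = '\n'.join(current_dsl)
--         variations.append(current_variation)
--
--     return variations
-- ===== SOURCE B (Python) =====
-- from typing import Dict, Any, List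
--
-- def _split_blocks(lines):
--     """Split stripped lines into the prefix before the first '"variation_name"'
--     marker and a list of blocks, each starting with a marker line."""
--     pre, blocks, cur = [], [], None
--     for ln in lines:
--         if ln.startswith('"variation_name"'):
--             if cur is not None:
--                 blocks.append(cur)
--             cur = [ln]
--         elif cur is None:
--             pre.append(ln)
--         else:
--             cur.append(ln)
--     if cur is not None:
--         blocks.append(cur)
--     return pre, blocks
--
-- def _parse_block(header, body):
--     """Parse one block: optional marker header line plus body lines.
--     Returns [] when nothing was collected, else a one-element list."""
--     d = {}
--     if header is not None:
--         d['variation_name'] = header.split(':', 1)[1].strip().strip('"')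
--     dsl = []
--     in_dsl = False
--     for ln in body:
--         if ln.startswith('"description"'):
--             d['description'] = ln.split(':', 1)[1].strip().strip('"')
--         elif ln.startswith('"dsl_script"'):
--             in_dsl = True
--         elif in_dsl and ln and not ln.startswith('"'):
--             dsl.append(ln)
--     if not d:
--         return []
--     d['dsl_script'] = '\n'.join(dsl)
--     return [d]
--
-- def extract_variations_from_text(text: str) -> List[Dict[str, Any]]:
--     lines = [ln.strip() for ln in text.split('\n')]
--     pre, blocks = _split_blocks(lines)
--     out = _parse_block(None, pre)
--     for blk in blocks:
--         out += _parse_block(blk[0], blk[1:])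
--     return out
-- ===== Notes on version B (the rewrite author's own statement) =====
-- stated objective: alternative
-- what changed: Replaces A's single interleaved state machine over all lines with a split-into-blocks pass (prefix + segments headed by '"variation_name"' lines) followed by an independent per-block parse.
import Mathlib
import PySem

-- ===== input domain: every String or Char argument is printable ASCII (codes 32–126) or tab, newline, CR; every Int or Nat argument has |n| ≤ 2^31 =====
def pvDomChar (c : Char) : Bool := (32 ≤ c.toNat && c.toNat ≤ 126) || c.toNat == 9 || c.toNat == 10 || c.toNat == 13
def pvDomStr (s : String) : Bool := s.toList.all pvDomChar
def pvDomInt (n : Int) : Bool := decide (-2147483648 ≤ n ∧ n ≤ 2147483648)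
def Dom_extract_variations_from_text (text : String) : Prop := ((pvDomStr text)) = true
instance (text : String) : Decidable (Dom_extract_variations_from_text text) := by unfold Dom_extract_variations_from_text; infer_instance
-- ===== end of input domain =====

-- B replaces A's single interleaved state machine by a split-into-blocks pass followed by a
-- per-block parse (objective: alternative decomposition, same cost).

-- ===== PORT A =====

-- line.split(':', 1)[1].strip().strip('"')  (the [1] raises IndexError when the line has no ':';
-- here it yields "" there — exactly those inputs are excluded by Pre_)
def pvTailVal (line : String) : String :=
  PySem.Str.stripChars
    (PySem.Str.strip (((PySem.Str.splitMax? line ":" 1).bind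
        (fun ps => PySem.List.pyGet? ps 1)).getD ""))
    "\""

def pvIsMarker (l : String) : Bool := PySem.Str.startswith l "\"variation_name\""
def pvIsDesc (l : String) : Bool := PySem.Str.startswith l "\"description\""
def pvIsDslMark (l : String) : Bool := PySem.Str.startswith l "\"dsl_script\""

-- if current_variation: current_variation['dsl_script'] = '\n'.join(current_dsl); variations.append(...)
def pvFlush (d : PySem.Dict String String) (dsl : List String) : List (List (String × String)) :=
  if d.items.isEmpty then []
  else [(d.insert "dsl_script" (PySem.Str.join "\n" dsl)).items]

-- one iteration of A's loop on the already-stripped line: state = (variations, current_variation, current_dsl, in_dsl_block)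
def pvCore (st : List (List (String × String)) × PySem.Dict String String × List String × Bool)
    (line : String) :
    List (List (String × String)) × PySem.Dict String String × List String × Bool :=
  if pvIsMarker line then
    (st.1 ++ pvFlush st.2.1 st.2.2.1,
     PySem.Dict.empty.insert "variation_name" (pvTailVal line), [], false)
  else if pvIsDesc line then
    (st.1, st.2.1.insert "description" (pvTailVal line), st.2.2.1, st.2.2.2)
  else if pvIsDslMark line then
    (st.1, st.2.1, st.2.2.1, true)
  else if st.2.2.2 && !(line == "") && !(PySem.Str.startswith line "\"") then
    (st.1, st.2.1, st.2.2.1 ++ [line], st.2.2.2)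
  else st

def extract_variations_from_text (text : String) : List (List (String × String)) :=
  let lines := (PySem.Str.split? text "\n").getD []
  let st := lines.foldl (fun st raw => pvCore st (PySem.Str.strip raw))
      ([], PySem.Dict.empty, [], false)
  st.1 ++ pvFlush st.2.1 st.2.2.1

-- ===== PORT B =====

-- _split_blocks: forward loop with state (pre, finished blocks, current block or None)
def pvSplitStep (st : List String × List (List String) × Option (List String)) (ln : String) :
    List String × List (List String) × Option (List String) :=
  if pvIsMarker ln then
    match st.2.2 with
    | some c => (st.1, st.2.1 ++ [c], some [ln])
    | none => (st.1, st.2.1, some [ln])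
  else
    match st.2.2 with
    | none => (st.1 ++ [ln], st.2.1, none)
    | some c => (st.1, st.2.1, some (c ++ [ln]))

def pvFinishSplit (st : List String × List (List String) × Option (List String)) :
    List String × List (List String) :=
  match st.2.2 with
  | some c => (st.1, st.2.1 ++ [c])
  | none => (st.1, st.2.1)

def pvSplitBlocks (lines : List String) : List String × List (List String) :=
  pvFinishSplit (lines.foldl pvSplitStep ([], [], none))

-- body loop of _parse_block: state = (d, dsl, in_dsl)
def pvBodyStep (st : PySem.Dict String String × List String × Bool) (ln : String) :
    PySem.Dict String String × List String × Bool :=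
  if pvIsDesc ln then (st.1.insert "description" (pvTailVal ln), st.2.1, st.2.2)
  else if pvIsDslMark ln then (st.1, st.2.1, true)
  else if st.2.2 && !(ln == "") && !(PySem.Str.startswith ln "\"") then
    (st.1, st.2.1 ++ [ln], st.2.2)
  else st

def pvParseBlock (header : Option String) (body : List String) : List (List (String × String)) :=
  let d0 : PySem.Dict String String :=
    match header with
    | some h => PySem.Dict.empty.insert "variation_name" (pvTailVal h)
    | none => PySem.Dict.empty
  let st := body.foldl pvBodyStep (d0, [], false)
  if st.1.items.isEmpty then []
  else [(st.1.insert "dsl_script" (PySem.Str.join "\n" st.2.1)).items]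

def extract_variations_from_text_alt (text : String) : List (List (String × String)) :=
  let lines := ((PySem.Str.split? text "\n").getD []).map PySem.Str.strip
  let pb := pvSplitBlocks lines
  pb.2.foldl
    (fun out blk => out ++ pvParseBlock (PySem.List.pyGet? blk 0) (PySem.List.slice blk (some 1) none))
    (pvParseBlock none pb.1)

-- ===== PRECONDITION & SPEC =====
-- Pre_ excludes exactly the inputs on which A raises IndexError: a stripped line that starts with
-- '"variation_name"' or '"description"' but contains no ':', where line.split(':', 1)[1] fails.
def Pre_extract_variations_from_text (text : String) : Prop :=
  ∀ l ∈ (PySem.Str.split? text "\n").getD [],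
    (pvIsMarker (PySem.Str.strip l) || pvIsDesc (PySem.Str.strip l)) = true →
    PySem.Str.isIn ":" (PySem.Str.strip l) = true

instance (text : String) : Decidable (Pre_extract_variations_from_text text) := by
  unfold Pre_extract_variations_from_text; infer_instance

def pvWitness_extract_variations_from_text : String :=
  "\"variation_name\": \"v1\"\n\"dsl_script\": \"\nGET /x\n\"description\": d"

def Spec_extract_variations_from_text (text : String) (out : List (List (String × String))) : Prop := out = extract_variations_from_text_alt text
instance (text : String) (out : List (List (String × String))) : Decidable (Spec_extract_variations_from_text text out) := by unfold Spec_extract_variations_from_text; infer_instance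

-- ===== CLAIM (what is proved, stated in full; the proofs are below) =====
def Claim_equal_extract_variations_from_text : Prop := ∀ (text : String), Dom_extract_variations_from_text text → Pre_extract_variations_from_text text → Spec_extract_variations_from_text text (extract_variations_from_text text)

-- ===== LEMMAS AND PROOFS =====

-- recursive characterization of _split_blocks
def pvSplitRec : List String → List String × List (List String)
  | [] => ([], [])
  | l :: ls =>
    let r := pvSplitRec ls
    if pvIsMarker l then ([], (l :: r.1) :: r.2) else (l :: r.1, r.2)

lemma pv_split_loop (ls : List String) :
    ∀ (pre : List String) (bs : List (List String)) (oc : Option (List String)),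
    pvFinishSplit (ls.foldl pvSplitStep (pre, bs, oc)) =
      match oc with
      | none => (pre ++ (pvSplitRec ls).1, bs ++ (pvSplitRec ls).2)
      | some c => (pre, bs ++ ((c ++ (pvSplitRec ls).1) :: (pvSplitRec ls).2)) := by
  induction ls with
  | nil =>
    intro pre bs oc
    cases oc <;> simp [pvFinishSplit, pvSplitRec]
  | cons l ls ih =>
    intro pre bs oc
    by_cases h : pvIsMarker l = true
    · cases oc <;>
        simp [List.foldl_cons, pvSplitStep, h, ih, pvSplitRec]
    · cases oc <;>
        simp [List.foldl_cons, pvSplitStep, h, ih, pvSplitRec]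

lemma pv_splitBlocks_eq (ls : List String) : pvSplitBlocks ls = pvSplitRec ls := by
  have := pv_split_loop ls [] [] none
  simpa [pvSplitBlocks] using this

-- the body-parse result from an arbitrary starting state
def pvBodyOut (d : PySem.Dict String String) (dsl : List String) (b : Bool)
    (body : List String) : List (List (String × String)) :=
  let st := body.foldl pvBodyStep (d, dsl, b)
  if st.1.items.isEmpty then []
  else [(st.1.insert "dsl_script" (PySem.Str.join "\n" st.2.1)).items]

lemma pv_parseBlock_none (body : List String) :
    pvParseBlock none body = pvBodyOut PySem.Dict.empty [] false body := rfl

lemma pv_parseBlock_some (h : String) (body : List String) :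
    pvParseBlock (some h) body =
      pvBodyOut (PySem.Dict.empty.insert "variation_name" (pvTailVal h)) [] false body := rfl

lemma pv_bodyOut_nil (d : PySem.Dict String String) (dsl : List String) (b : Bool) :
    pvBodyOut d dsl b [] = pvFlush d dsl := rfl

-- on a non-marker line, A's step only touches the (d, dsl, in_dsl) part, exactly as B's body step
lemma pv_core_nonmarker (vars : List (List (String × String))) (d : PySem.Dict String String)
    (dsl : List String) (b : Bool) (l : String) (h : pvIsMarker l = false) :
    pvCore (vars, d, dsl, b) l = (vars, pvBodyStep (d, dsl, b) l) := by
  simp only [pvCore, pvBodyStep, h, Bool.false_eq_true, if_false]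
  split_ifs <;> rfl

def pvBlockOut (blk : List String) : List (List (String × String)) :=
  pvParseBlock (PySem.List.pyGet? blk 0) (PySem.List.slice blk (some 1) none)

lemma pv_blockOut_cons (l : String) (rest : List String) :
    pvBlockOut (l :: rest) = pvParseBlock (some l) rest := by
  simp [pvBlockOut, PySem.List.slice]

-- the main invariant: A's loop from any state equals prefix-parse plus per-block parses
lemma pv_main (ls : List String) :
    ∀ (vars : List (List (String × String))) (d : PySem.Dict String String)
      (dsl : List String) (b : Bool),
    (fun st => st.1 ++ pvFlush st.2.1 st.2.2.1) (ls.foldl pvCore (vars, d, dsl, b)) =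
      vars ++ pvBodyOut d dsl b (pvSplitRec ls).1 ++ (pvSplitRec ls).2.flatMap pvBlockOut := by
  induction ls with
  | nil =>
    intro vars d dsl b
    simp [pvSplitRec, pv_bodyOut_nil, pvFlush]
  | cons l ls ih =>
    intro vars d dsl b
    by_cases h : pvIsMarker l = true
    · have hstep : pvCore (vars, d, dsl, b) l =
          (vars ++ pvFlush d dsl,
           PySem.Dict.empty.insert "variation_name" (pvTailVal l), [], false) := by
        simp [pvCore, h]
      rw [List.foldl_cons, hstep, ih]
      simp [pvSplitRec, h, pv_bodyOut_nil, pv_blockOut_cons, pv_parseBlock_some, List.append_assoc]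
    · have h' : pvIsMarker l = false := by simpa using h
      rw [List.foldl_cons, pv_core_nonmarker vars d dsl b l h', ih]
      have hb : pvBodyOut d dsl b (l :: (pvSplitRec ls).1) =
          pvBodyOut (pvBodyStep (d, dsl, b) l).1 (pvBodyStep (d, dsl, b) l).2.1
            (pvBodyStep (d, dsl, b) l).2.2 (pvSplitRec ls).1 := rfl
      simp [pvSplitRec, h', hb]

-- ===== VERDICT (by name: the statement is the Claim_ definition above) =====
theorem extract_variations_from_text_spec : Claim_equal_extract_variations_from_text := by
  intro text _ _
  unfold Spec_extract_variations_from_text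
  unfold extract_variations_from_text extract_variations_from_text_alt
  dsimp only
  rw [pv_splitBlocks_eq]
  have hmap : (((PySem.Str.split? text "\n").getD []).map PySem.Str.strip).foldl pvCore
      ([], PySem.Dict.empty, [], false) =
      ((PySem.Str.split? text "\n").getD []).foldl (fun st raw => pvCore st (PySem.Str.strip raw))
        ([], PySem.Dict.empty, [], false) := List.foldl_map
  have hA := pv_main (((PySem.Str.split? text "\n").getD []).map PySem.Str.strip)
      [] PySem.Dict.empty [] false
  rw [hmap] at hA
  simp only at hA
  rw [hA, PySem.List.foldl_append_eq_flatMap, pv_parseBlock_none]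
  simp only [List.nil_append]
  congr 1
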